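-- pv_equiv track=rewrite | github.com/mehrdadbakhtiari/adVNTR | advntr/vntr_finder.py | get_reference_repeat_order
-- ===== SOURCE A (Python) =====
-- def get_reference_repeat_order(patterns):
--     reference_repeat_order = ['L']
--     unique_repeat_units = sorted(list(set(patterns)))
--     for repeat_unit in patterns:
--         for i, unique_repeat_unit in enumerate(unique_repeat_units):
--             if repeat_unit == unique_repeat_unit:
--                 reference_repeat_order.append(str(i+1))
--     reference_repeat_order.append('R')
--
--     return reference_repeat_order
-- ===== SOURCE B (Python) =====
-- def get_reference_repeat_order(patterns):
--     seen = set(patterns)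
--     return ['L'] + [str(1 + sum(q < p for q in seen)) for p in patterns] + ['R']
-- ===== Notes on version B (the rewrite author's own statement) =====
-- stated objective: alternative
-- what changed: Replaces A's sort-the-uniques-then-scan-for-position scheme with a sort-free counting rank: each pattern's rank is 1 plus the number of distinct patterns strictly smaller than it.
import Mathlib
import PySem

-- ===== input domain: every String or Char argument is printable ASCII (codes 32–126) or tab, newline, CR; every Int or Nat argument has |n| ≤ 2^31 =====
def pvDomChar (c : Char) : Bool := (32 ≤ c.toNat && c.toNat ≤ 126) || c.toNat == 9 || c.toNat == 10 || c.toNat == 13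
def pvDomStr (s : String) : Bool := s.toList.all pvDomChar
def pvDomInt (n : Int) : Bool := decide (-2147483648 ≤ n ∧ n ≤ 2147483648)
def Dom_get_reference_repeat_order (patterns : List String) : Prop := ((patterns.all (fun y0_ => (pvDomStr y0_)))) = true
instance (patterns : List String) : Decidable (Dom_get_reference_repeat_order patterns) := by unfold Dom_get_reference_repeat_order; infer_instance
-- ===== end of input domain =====

-- B ranks each pattern as 1 + the number of distinct patterns strictly smaller than it,
-- with no sort and no positional table; an alternative algorithm of similar cost.

-- ===== PORT A =====
def get_reference_repeat_order (patterns : List String) : List String :=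
  let unique_repeat_units := PySem.List.sorted (PySem.Set.ofList patterns) (fun x => x) false
  let reference_repeat_order := patterns.foldl
    (fun acc repeat_unit =>
      (PySem.List.enumerate unique_repeat_units 0).foldl
        (fun acc2 iu => if repeat_unit == iu.2 then acc2 ++ [PySem.Int.toStr (iu.1 + 1)] else acc2)
        acc)
    ["L"]
  reference_repeat_order ++ ["R"]

-- ===== PORT B =====
-- sum(q < p for q in seen) sums booleans over a set; the sum is order-insensitive,
-- ported exactly as countP over the PySem.Set's element list.
def get_reference_repeat_order_alt (patterns : List String) : List String :=
  let seen := PySem.Set.ofList patterns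
  ["L"] ++ patterns.map
    (fun p => PySem.Int.toStr (1 + (seen.countP (fun q => decide (q < p)) : Int))) ++ ["R"]

-- ===== PRECONDITION & SPEC =====
def Spec_get_reference_repeat_order (patterns : List String) (out : List String) : Prop := out = get_reference_repeat_order_alt patterns
instance (patterns : List String) (out : List String) : Decidable (Spec_get_reference_repeat_order patterns out) := by unfold Spec_get_reference_repeat_order; infer_instance

-- ===== CLAIM (what is proved, stated in full; the proofs are below) =====
def Claim_equal_get_reference_repeat_order : Prop := ∀ (patterns : List String), Dom_get_reference_repeat_order patterns → Spec_get_reference_repeat_order patterns (get_reference_repeat_order patterns)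

-- ===== LEMMAS AND PROOFS =====

-- A's inner loop over enumerate appends nothing when p is absent
theorem innerA_not_mem (us : List String) (p : String) (acc : List String) (s : Int)
    (hp : p ∉ us) :
    (PySem.List.enumerate us s).foldl
      (fun acc2 iu => if p == iu.2 then acc2 ++ [PySem.Int.toStr (iu.1 + 1)] else acc2) acc
    = acc := by
  induction us generalizing acc s with
  | nil => simp [PySem.List.enumerate_nil]
  | cons x t ih =>
    rw [PySem.List.enumerate_cons, List.foldl_cons,
        if_neg (by simp; exact fun h => hp (by rw [h]; exact List.mem_cons_self))]
    exact ih _ _ (fun h => hp (List.mem_cons_of_mem _ h))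

-- A's inner loop appends exactly the (1-based) index of p in a duplicate-free list
theorem innerA_mem (us : List String) (p : String) (acc : List String) (s : Int)
    (hnd : us.Nodup) (hp : p ∈ us) :
    (PySem.List.enumerate us s).foldl
      (fun acc2 iu => if p == iu.2 then acc2 ++ [PySem.Int.toStr (iu.1 + 1)] else acc2) acc
    = acc ++ [PySem.Int.toStr (s + (us.idxOf p : Int) + 1)] := by
  induction us generalizing acc s with
  | nil => simp at hp
  | cons x t ih =>
    rcases List.nodup_cons.mp hnd with ⟨hxn, hndt⟩
    by_cases hx : p = x
    · subst hx
      rw [PySem.List.enumerate_cons, List.foldl_cons, if_pos (by simp),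
          innerA_not_mem t p _ (s + 1) hxn, List.idxOf_cons_self]
      norm_num
    · rcases List.mem_cons.mp hp with h | h
      · exact absurd h hx
      · rw [PySem.List.enumerate_cons, List.foldl_cons, if_neg (by simp [hx]),
            ih _ _ hndt h, List.idxOf_cons_ne _ (fun he => hx he.symm)]
        have : s + 1 + (t.idxOf p : Int) + 1 = s + ((t.idxOf p + 1 : Nat) : Int) + 1 := by
          push_cast; ring
        rw [this]

-- in a strictly increasing list, the index of a member equals the count of smaller elements
theorem idxOf_eq_countP_lt (us : List String) (p : String)
    (hs : us.Pairwise (· < ·)) (hp : p ∈ us) :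
    us.idxOf p = us.countP (fun q => decide (q < p)) := by
  induction us with
  | nil => simp at hp
  | cons x t ih =>
    rcases List.pairwise_cons.mp hs with ⟨hxlt, hst⟩
    by_cases hx : p = x
    · subst hx
      have h0 : t.countP (fun q => decide (q < p)) = 0 := by
        rw [List.countP_eq_zero]
        intro q hq
        simp [not_lt_of_gt (hxlt q hq)]
      rw [List.idxOf_cons_self, List.countP_cons, h0]
      simp
    · rcases List.mem_cons.mp hp with h | h
      · exact absurd h hx
      · rw [List.idxOf_cons_ne _ (fun he => hx he.symm), List.countP_cons,
            ih hst h]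
        simp [hxlt p h]

-- countP is the same over permuted lists
theorem countP_perm_seen (patterns : List String) (p : String) :
    (PySem.List.sorted (PySem.Set.ofList patterns) (fun x => x) false).countP
        (fun q => decide (q < p))
      = (PySem.Set.ofList patterns).countP (fun q => decide (q < p)) :=
  (PySem.List.sorted_perm _ _ _).countP_eq _

-- ===== VERDICT (by name: the statement is the Claim_ definition above) =====
theorem get_reference_repeat_order_spec : Claim_equal_get_reference_repeat_order := by
  intro patterns _
  unfold Spec_get_reference_repeat_order
  have hpw : (PySem.List.sorted (PySem.Set.ofList patterns) (fun x => x) false).Pairwise (· < ·) :=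
    PySem.List.sorted_ofList_pairwise_lt patterns
  have hnd : (PySem.List.sorted (PySem.Set.ofList patterns) (fun x => x) false).Nodup :=
    List.Pairwise.imp (fun h => ne_of_lt h) hpw
  have hmem : ∀ p ∈ patterns,
      p ∈ PySem.List.sorted (PySem.Set.ofList patterns) (fun x => x) false := by
    intro p hp
    rw [PySem.List.mem_sorted]
    exact (PySem.Set.mem_ofList patterns p).mpr hp
  simp only [get_reference_repeat_order, get_reference_repeat_order_alt]
  rw [PySem.List.foldl_congr_mem patterns _
        (fun acc p => acc ++ [PySem.Int.toStr
          (1 + ((PySem.Set.ofList patterns).countP (fun q => decide (q < p)) : Int))])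
        ["L"]
        (by intro acc p hp
            rw [innerA_mem _ p acc 0 hnd (hmem p hp),
                idxOf_eq_countP_lt _ p hpw (hmem p hp), countP_perm_seen]
            norm_num [add_comm]),
      PySem.List.foldl_append_singleton_eq_map]
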